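-- pv_equiv track=rewrite | github.com/ustaslive/words | lab/crossword_repeatability/mode004_simulation.py | _select_excluded_letters
-- ===== SOURCE A (Python) =====
-- ALPHABET = "ABCDEFGHIJKLMNOPQRSTUVWXYZ"
--
-- ORIGIN_INDEX = 0
--
-- def _select_excluded_letters(
--     previous_seed_letters: str,
--     exclude_count: int,
--     letter_stats: dict[str, int],
-- ) -> list[str]:
--     previous_letters = {
--         char
--         for char in previous_seed_letters.strip().upper()
--         if char in ALPHABET
--     }
--     if not previous_letters:
--         return []
--     ordered_letters = sorted(
--         previous_letters,
--         key=lambda char: (-letter_stats.get(char, ORIGIN_INDEX), char),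
--     )
--     take_count = min(max(exclude_count, ORIGIN_INDEX), len(ordered_letters))
--     return ordered_letters[:take_count]
-- ===== SOURCE B (Python) =====
-- ALPHABET = "ABCDEFGHIJKLMNOPQRSTUVWXYZ"
--
--
-- def _select_excluded_letters(previous_seed_letters, exclude_count, letter_stats):
--     # Dedup valid letters in first-seen order, then pick take_count letters by
--     # repeated selection of the (max frequency, then smallest char) candidate.
--     pool = []
--     for char in previous_seed_letters.strip().upper():
--         if char in ALPHABET and char not in pool:
--             pool.append(char)
--     take_count = min(max(exclude_count, 0), len(pool))
--     result = []
--     for _ in range(take_count):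
--         best = pool[0]
--         for char in pool[1:]:
--             f = letter_stats.get(char, 0)
--             bf = letter_stats.get(best, 0)
--             if f > bf or (f == bf and char < best):
--                 best = char
--         result.append(best)
--         pool.remove(best)
--     return result
-- ===== Notes on version B (the rewrite author's own statement) =====
-- stated objective: alternative
-- what changed: Replaces set-comprehension + sorted(key=(-freq, char)) + slice with a fused dedup loop over the string followed by repeated selection: take_count times scan the remaining pool for the max-frequency (smallest-char tie-break) letter, append it and remove it from the pool.
import Mathlib
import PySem

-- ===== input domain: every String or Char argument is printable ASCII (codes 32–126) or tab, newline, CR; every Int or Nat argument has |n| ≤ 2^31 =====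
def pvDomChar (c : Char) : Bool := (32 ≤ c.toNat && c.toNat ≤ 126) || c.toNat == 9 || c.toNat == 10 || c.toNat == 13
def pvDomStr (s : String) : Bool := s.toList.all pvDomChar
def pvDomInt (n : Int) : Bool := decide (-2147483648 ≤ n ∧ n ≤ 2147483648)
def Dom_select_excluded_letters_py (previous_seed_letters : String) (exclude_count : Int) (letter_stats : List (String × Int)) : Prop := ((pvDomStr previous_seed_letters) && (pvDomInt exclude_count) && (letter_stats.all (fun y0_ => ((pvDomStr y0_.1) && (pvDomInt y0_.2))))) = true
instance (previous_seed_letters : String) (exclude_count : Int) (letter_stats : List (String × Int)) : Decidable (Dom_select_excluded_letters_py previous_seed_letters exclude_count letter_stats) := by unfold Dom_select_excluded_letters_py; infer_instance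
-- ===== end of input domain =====

-- B replaces the sort-then-slice with repeated selection of the (max frequency, then
-- smallest letter) candidate from a dedup pool; objective: alternative (same result, no sort).

def pyALPHABET : String := "ABCDEFGHIJKLMNOPQRSTUVWXYZ"

-- ===== PORT A =====
def select_excluded_letters_py (previous_seed_letters : String) (exclude_count : Int) (letter_stats : List (String × Int)) : List String :=
  let previous_letters : PySem.Set String :=
    PySem.Set.ofList
      (((PySem.Str.upper (PySem.Str.strip previous_seed_letters)).toList.map
          (fun c => String.ofList [c])).filter
        (fun ch => PySem.Str.isIn ch pyALPHABET))
  if previous_letters = [] then []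
  else
    let ordered_letters :=
      PySem.List.sorted2 previous_letters
        (fun ch => -(PySem.Dict.getD (PySem.Dict.mk letter_stats) ch 0)) (fun ch => ch) false
    let take_count : Int := min (max exclude_count 0) (ordered_letters.length : Int)
    PySem.List.slice ordered_letters none (some take_count)

-- ===== PORT B =====
-- dedup loop: ALPHABET letters of the stripped/uppered seed, first occurrences in order
def altPool (previous_seed_letters : String) : List String :=
  (PySem.Str.upper (PySem.Str.strip previous_seed_letters)).toList.foldl
    (fun pool c =>
      let ch := String.ofList [c]
      if PySem.Str.isIn ch pyALPHABET && !pool.contains ch then pool ++ [ch] else pool) []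

-- inner scan: best candidate of best::rest under (max frequency, then smallest char)
def altBest (letter_stats : List (String × Int)) (best0 : String) (rest : List String) : String :=
  rest.foldl
    (fun best ch =>
      let f := PySem.Dict.getD (PySem.Dict.mk letter_stats) ch 0
      let bf := PySem.Dict.getD (PySem.Dict.mk letter_stats) best 0
      if bf < f ∨ (f = bf ∧ ch < best) then ch else best) best0

-- selection loop: pick the best, remove it from the pool, repeat take_count times
-- (the [] branch is unreachable: take_count ≤ pool length)
def altPick (letter_stats : List (String × Int)) : Nat → List String → List String
  | 0, _ => []
  | _ + 1, [] => []
  | n + 1, p :: ps =>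
    let best := altBest letter_stats p ps
    let pool' := (PySem.List.remove? (p :: ps) best).getD []
    best :: altPick letter_stats n pool'

def select_excluded_letters_py_alt (previous_seed_letters : String) (exclude_count : Int) (letter_stats : List (String × Int)) : List String :=
  let pool := altPool previous_seed_letters
  let take_count : Int := min (max exclude_count 0) (pool.length : Int)
  altPick letter_stats take_count.toNat pool

-- ===== PRECONDITION & SPEC =====
def Spec_select_excluded_letters_py (previous_seed_letters : String) (exclude_count : Int) (letter_stats : List (String × Int)) (out : List String) : Prop := out = select_excluded_letters_py_alt previous_seed_letters exclude_count letter_stats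
instance (previous_seed_letters : String) (exclude_count : Int) (letter_stats : List (String × Int)) (out : List String) : Decidable (Spec_select_excluded_letters_py previous_seed_letters exclude_count letter_stats out) := by unfold Spec_select_excluded_letters_py; infer_instance

-- ===== CLAIM (what is proved, stated in full; the proofs are below) =====
def Claim_equal_select_excluded_letters_py : Prop := ∀ (previous_seed_letters : String) (exclude_count : Int) (letter_stats : List (String × Int)), Dom_select_excluded_letters_py previous_seed_letters exclude_count letter_stats → Spec_select_excluded_letters_py previous_seed_letters exclude_count letter_stats (select_excluded_letters_py previous_seed_letters exclude_count letter_stats)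

-- ===== LEMMAS AND PROOFS =====

-- the strict order A sorts by: ascending (-(frequency), char); total because char breaks ties
def bfr (key : String → Int) (a b : String) : Bool :=
  decide (key a < key b) || (!decide (key b < key a) && decide (a < b))

theorem bfr_iff (key : String → Int) (a b : String) :
    bfr key a b = true ↔ (key a < key b ∨ (key a = key b ∧ a < b)) := by
  simp only [bfr, Bool.or_eq_true, Bool.and_eq_true, Bool.not_eq_true', decide_eq_true_iff,
    decide_eq_false_iff_not]
  constructor
  · rintro (h | ⟨h1, h2⟩)
    · exact Or.inl h
    · rcases lt_trichotomy (key a) (key b) with hk | hk | hk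
      · exact Or.inl hk
      · exact Or.inr ⟨hk, h2⟩
      · exact absurd hk h1
  · rintro (h | ⟨h1, h2⟩)
    · exact Or.inl h
    · exact Or.inr ⟨by omega, h2⟩

theorem bfr_irrefl (key : String → Int) (a : String) : bfr key a a = false := by
  simp [bfr]

theorem bfr_total (key : String → Int) {a b : String} (h : a ≠ b) :
    bfr key a b = true ∨ bfr key b a = true := by
  rw [bfr_iff, bfr_iff]
  rcases lt_trichotomy (key a) (key b) with hk | hk | hk
  · exact Or.inl (Or.inl hk)
  · rcases lt_or_gt_of_ne h with hs | hs
    · exact Or.inl (Or.inr ⟨hk, hs⟩)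
    · exact Or.inr (Or.inr ⟨hk.symm, hs⟩)
  · exact Or.inr (Or.inl hk)

theorem bfr_asymm (key : String → Int) {a b : String} (h : bfr key a b = true) :
    bfr key b a = false := by
  rw [Bool.eq_false_iff]
  intro h'
  rw [bfr_iff] at h h'
  rcases h with h | ⟨h1, h2⟩ <;> rcases h' with h' | ⟨h1', h2'⟩ <;>
    first
    | omega
    | exact absurd h2' (asymm h2)

theorem bfr_trans (key : String → Int) {a b c : String}
    (h1 : bfr key a b = true) (h2 : bfr key b c = true) : bfr key a c = true := by
  rw [bfr_iff] at h1 h2 ⊢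
  rcases h1 with h1 | ⟨h1a, h1b⟩ <;> rcases h2 with h2 | ⟨h2a, h2b⟩
  · exact Or.inl (by omega)
  · exact Or.inl (by omega)
  · exact Or.inl (by omega)
  · exact Or.inr ⟨by omega, lt_trans h1b h2b⟩

-- insertion keeps strict bfr-sortedness when the new element is fresh
theorem pairwise_insertBy (key : String → Int) (x : String) (ys : List String)
    (hys : ys.Pairwise (fun a b => bfr key a b = true)) (hx : ∀ y ∈ ys, y ≠ x) :
    (PySem.List.insertBy (bfr key) x ys).Pairwise (fun a b => bfr key a b = true) := by
  induction ys with
  | nil => simp [PySem.List.insertBy]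
  | cons y ys ih =>
    have hxy : y ≠ x := hx y (List.mem_cons_self)
    simp only [PySem.List.insertBy]
    split
    · rename_i hb
      refine List.Pairwise.cons ?_ hys
      intro z hz
      rcases List.mem_cons.mp hz with rfl | hz
      · exact hb
      · exact bfr_trans key hb (List.rel_of_pairwise_cons hys hz)
    · rename_i hb
      refine List.Pairwise.cons ?_ (ih hys.of_cons (fun y hy => hx y (List.mem_cons_of_mem _ hy)))
      intro z hz
      rcases (PySem.List.insertBy_mem_iff _ _ _ _).mp hz with rfl | hz
      · rcases bfr_total key hxy.symm with h | h
        · exact absurd h (by simpa using hb)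
        · exact h
      · exact List.rel_of_pairwise_cons hys hz

-- the insertion-sort loop produces a strictly bfr-sorted list from a Nodup input
theorem pairwise_foldl_insertBy (key : String → Int) (l acc : List String)
    (h : (acc ++ l).Nodup) (hacc : acc.Pairwise (fun a b => bfr key a b = true)) :
    (l.foldl (fun acc x => PySem.List.insertBy (bfr key) x acc) acc).Pairwise
      (fun a b => bfr key a b = true) := by
  induction l generalizing acc with
  | nil => simpa using hacc
  | cons x l ih =>
    simp only [List.foldl_cons]
    have hxacc : ∀ y ∈ acc, y ≠ x := by
      intro y hy rfl
      have := List.disjoint_of_nodup_append h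
      exact this hy (List.mem_cons_self)
    refine ih _ ?_ (pairwise_insertBy key x acc hacc hxacc)
    have hperm : (PySem.List.insertBy (bfr key) x acc ++ l).Perm (acc ++ x :: l) := by
      exact ((PySem.List.insertBy_perm (bfr key) x acc).append_right l).trans
        List.perm_middle.symm
    exact hperm.nodup_iff.mpr h

-- a strictly bfr-sorted permutation is unique
theorem eq_of_perm_pairwise (key : String → Int) : ∀ {l₁ l₂ : List String}, l₁.Perm l₂ →
    l₁.Pairwise (fun a b => bfr key a b = true) →
    l₂.Pairwise (fun a b => bfr key a b = true) → l₁ = l₂ := by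
  intro l₁
  induction l₁ with
  | nil => intro l₂ hp _ _; simp [hp.nil_eq]
  | cons a t₁ ih =>
    intro l₂ hp h1 h2
    cases l₂ with
    | nil => exact absurd hp.symm.nil_eq (by simp)
    | cons b t₂ =>
      have hab : a = b := by
        by_contra hne
        have ha : a ∈ b :: t₂ := hp.mem_iff.mp (List.mem_cons_self)
        have hb : b ∈ a :: t₁ := hp.mem_iff.mpr (List.mem_cons_self)
        have ha' : a ∈ t₂ := by
          rcases List.mem_cons.mp ha with rfl | h
          · exact absurd rfl hne
          · exact h
        have hb' : b ∈ t₁ := by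
          rcases List.mem_cons.mp hb with rfl | h
          · exact absurd rfl (Ne.symm hne)
          · exact h
        have h1' := List.rel_of_pairwise_cons h1 hb'
        have h2' := List.rel_of_pairwise_cons h2 ha'
        exact absurd h1' (by simp [bfr_asymm key h2'])
      subst hab
      have := ih (hp.cons_inv) h1.of_cons h2.of_cons
      rw [this]

-- the sort of a Nodup pool starts with its bfr-minimum, followed by the sort of the rest
theorem foldl_insertBy_cons_min (key : String → Int) (pool : List String) (hnd : pool.Nodup)
    (best : String) (hmem : best ∈ pool) (hmin : ∀ y ∈ pool, bfr key y best = false) :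
    pool.foldl (fun acc x => PySem.List.insertBy (bfr key) x acc) []
      = best :: (pool.erase best).foldl (fun acc x => PySem.List.insertBy (bfr key) x acc) [] := by
  have hnd' : (pool.erase best).Nodup := hnd.erase best
  refine eq_of_perm_pairwise key ?_ ?_ ?_
  · refine (PySem.List.foldl_insertBy_perm (bfr key) pool []).trans ?_
    simp only [List.nil_append]
    refine (List.perm_cons_erase hmem).trans (List.Perm.cons best ?_)
    exact ((PySem.List.foldl_insertBy_perm (bfr key) (pool.erase best) []).trans
      (by simp)).symm
  · exact pairwise_foldl_insertBy key pool [] (by simpa using hnd) List.Pairwise.nil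
  · refine List.Pairwise.cons ?_
      (pairwise_foldl_insertBy key (pool.erase best) [] (by simpa using hnd') List.Pairwise.nil)
    intro z hz
    have hz' : z ∈ pool.erase best := by
      have := (PySem.List.foldl_insertBy_perm (bfr key) (pool.erase best) []).mem_iff.mp hz
      simpa using this
    have hzz := (hnd.mem_erase_iff).mp hz'
    rcases bfr_total key hzz.1.symm with h | h
    · exact h
    · exact absurd h (by simp [hmin z hzz.2])

-- the selection scan returns the bfr-minimum of p :: ps
theorem foldlMin_spec (key : String → Int) : ∀ (ps : List String) (p : String),
    (ps.foldl (fun best ch => if bfr key ch best = true then ch else best) p) ∈ p :: ps ∧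
    ∀ y ∈ p :: ps, bfr key y (ps.foldl (fun best ch => if bfr key ch best = true then ch else best) p) = false := by
  intro ps
  induction ps with
  | nil =>
    intro p
    refine ⟨List.mem_cons_self, ?_⟩
    intro y hy
    rcases List.mem_cons.mp hy with rfl | h
    · simp [bfr_irrefl]
    · simp at h
  | cons ch ps ih =>
    intro p
    simp only [List.foldl_cons]
    obtain ⟨hmem, hmin⟩ := ih (if bfr key ch p = true then ch else p)
    by_cases hcp : bfr key ch p = true
    · rw [if_pos hcp] at hmem hmin ⊢
      constructor
      · rcases List.mem_cons.mp hmem with h | h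
        · rw [h]; exact List.mem_cons_of_mem _ List.mem_cons_self
        · exact List.mem_cons_of_mem _ (List.mem_cons_of_mem _ h)
      · intro y hy
        rcases List.mem_cons.mp hy with rfl | hy'
        · rw [Bool.eq_false_iff]
          intro hpb
          have hchb := hmin ch List.mem_cons_self
          exact absurd (bfr_trans key hcp hpb) (by simp [hchb])
        · rcases List.mem_cons.mp hy' with rfl | hy''
          · exact hmin y List.mem_cons_self
          · exact hmin y (List.mem_cons_of_mem _ hy'')
    · rw [if_neg hcp] at hmem hmin ⊢
      constructor
      · rcases List.mem_cons.mp hmem with h | h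
        · rw [h]; exact List.mem_cons_self
        · exact List.mem_cons_of_mem _ (List.mem_cons_of_mem _ h)
      · intro y hy
        rcases List.mem_cons.mp hy with rfl | hy'
        · exact hmin y List.mem_cons_self
        · rcases List.mem_cons.mp hy' with heq | hy''
          · subst heq
            rw [Bool.eq_false_iff]
            intro hchb
            have hpb := hmin p List.mem_cons_self
            by_cases hcpe : y = p
            · rw [hcpe] at hchb
              exact absurd hchb (by simp [hpb])
            · rcases bfr_total key hcpe with h | h
              · exact absurd h hcp
              · exact absurd (bfr_trans key h hchb) (by simp [hpb])
          · exact hmin y (List.mem_cons_of_mem _ hy'')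

def keyOf (letter_stats : List (String × Int)) (ch : String) : Int :=
  -(PySem.Dict.getD (PySem.Dict.mk letter_stats) ch 0)

-- B's comparison is exactly bfr (keyOf letter_stats)
theorem altBest_eq (letter_stats : List (String × Int)) (p : String) (ps : List String) :
    altBest letter_stats p ps
      = ps.foldl (fun best ch => if bfr (keyOf letter_stats) ch best = true then ch else best) p := by
  unfold altBest
  congr 1
  funext best ch
  have hiff : ((PySem.Dict.getD (PySem.Dict.mk letter_stats) best 0
          < PySem.Dict.getD (PySem.Dict.mk letter_stats) ch 0)
        ∨ (PySem.Dict.getD (PySem.Dict.mk letter_stats) ch 0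
            = PySem.Dict.getD (PySem.Dict.mk letter_stats) best 0 ∧ ch < best))
      ↔ bfr (keyOf letter_stats) ch best = true := by
    rw [bfr_iff]
    unfold keyOf
    constructor
    · rintro (h | ⟨h1, h2⟩)
      · exact Or.inl (by omega)
      · exact Or.inr ⟨by omega, h2⟩
    · rintro (h | ⟨h1, h2⟩)
      · exact Or.inl (by omega)
      · exact Or.inr ⟨by omega, h2⟩
  show (if _ ∨ _ then ch else best) = _
  by_cases hc : bfr (keyOf letter_stats) ch best = true
  · rw [if_pos hc, if_pos (hiff.mpr hc)]
  · rw [if_neg hc, if_neg (fun h' => hc (hiff.mp h'))]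

theorem remove?_eq_erase {best : String} (pool : List String) (h : best ∈ pool) :
    PySem.List.remove? pool best = some (pool.erase best) := by
  unfold PySem.List.remove?
  induction pool with
  | nil => simp at h
  | cons p pool ih =>
    by_cases hpb : p = best
    · subst hpb
      simp [List.idxOf?_cons]
    · have h' : best ∈ pool := by
        rcases List.mem_cons.mp h with rfl | h'
        · exact absurd rfl hpb
        · exact h'
      have hbe : (p == best) = false := by simp [hpb]
      obtain ⟨k, hk⟩ := Option.isSome_iff_exists.mp
        (by simpa [List.idxOf?_eq_none_iff] using h' : (List.idxOf? best pool).isSome)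
      have hik := ih h'
      rw [hk] at hik
      simp only [Option.map_some, Option.some.injEq] at hik
      simp [List.idxOf?_cons, hbe, hk, List.eraseIdx_cons_succ, hik]

-- the selection loop yields the first n elements of the insertion sort
theorem pick_eq (letter_stats : List (String × Int)) : ∀ (n : Nat) (pool : List String),
    pool.Nodup → n ≤ pool.length →
    altPick letter_stats n pool
      = (pool.foldl (fun acc x => PySem.List.insertBy (bfr (keyOf letter_stats)) x acc) []).take n := by
  intro n
  induction n with
  | zero => intro pool _ _; simp [altPick]
  | succ n ih =>
    intro pool hnd hlen
    cases pool with
    | nil => simp at hlen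
    | cons p ps =>
      rw [altPick, altBest_eq]
      obtain ⟨hmem, hmin⟩ := foldlMin_spec (keyOf letter_stats) ps p
      set best := ps.foldl
        (fun best ch => if bfr (keyOf letter_stats) ch best = true then ch else best) p with hb
      rw [remove?_eq_erase _ hmem]
      simp only [Option.getD_some]
      rw [foldl_insertBy_cons_min (keyOf letter_stats) (p :: ps) hnd best hmem hmin,
        List.take_succ_cons]
      congr 1
      refine ih ((p :: ps).erase best) (hnd.erase best) ?_
      rw [List.length_erase_of_mem hmem]
      simp only [List.length_cons] at hlen ⊢
      omega

-- B's fused dedup loop equals A's filter-then-Set.ofList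
theorem pool_eq (previous_seed_letters : String) :
    altPool previous_seed_letters
      = PySem.Set.ofList
          (((PySem.Str.upper (PySem.Str.strip previous_seed_letters)).toList.map
              (fun c => String.ofList [c])).filter (fun ch => PySem.Str.isIn ch pyALPHABET)) := by
  have general : ∀ (l : List Char) (acc : List String),
      l.foldl (fun pool c =>
        let ch := String.ofList [c]
        if PySem.Str.isIn ch pyALPHABET && !pool.contains ch then pool ++ [ch] else pool) acc
      = ((l.map (fun c => String.ofList [c])).filter
          (fun ch => PySem.Str.isIn ch pyALPHABET)).foldl PySem.Set.add acc := by
    intro l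
    induction l with
    | nil => intro acc; rfl
    | cons c l ih =>
      intro acc
      simp only [List.foldl_cons, List.map_cons, List.filter_cons]
      by_cases hP : PySem.Str.isIn (String.ofList [c]) pyALPHABET = true
      · simp only [hP, if_true, List.foldl_cons]
        rw [ih]
        congr 1
        by_cases hc : acc.contains (String.ofList [c]) = true
        · simp [PySem.Set.add]
        · simp only [Bool.not_eq_true] at hc
          simp [PySem.Set.add]
      · simp only [Bool.not_eq_true] at hP
        simp only [hP, Bool.false_and, Bool.false_eq_true, if_false]
        rw [ih]
  unfold altPool
  rw [general]
  rfl

-- ===== VERDICT (by name: the statement is the Claim_ definition above) =====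
set_option maxHeartbeats 1000000 in
theorem select_excluded_letters_py_spec : Claim_equal_select_excluded_letters_py := by
  intro prev k stats _
  unfold Spec_select_excluded_letters_py
  simp only [select_excluded_letters_py, select_excluded_letters_py_alt]
  rw [pool_eq]
  set pool := PySem.Set.ofList
      (((PySem.Str.upper (PySem.Str.strip prev)).toList.map
          (fun c => String.ofList [c])).filter (fun ch => PySem.Str.isIn ch pyALPHABET)) with hpool
  have hnd : List.Nodup pool := PySem.Set.nodup_ofList _
  by_cases hempty : pool = []
  · rw [if_pos hempty, hempty]
    simp [altPick]
  · rw [if_neg hempty]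
    have hsort : PySem.List.sorted2 pool
        (fun ch => -(PySem.Dict.getD (PySem.Dict.mk stats) ch 0)) (fun ch => ch) false
        = pool.foldl (fun acc x => PySem.List.insertBy (bfr (keyOf stats)) x acc) [] := rfl
    rw [hsort]
    set sorted := pool.foldl (fun acc x => PySem.List.insertBy (bfr (keyOf stats)) x acc) []
      with hs
    have hlen : sorted.length = pool.length := by
      simpa using (PySem.List.foldl_insertBy_perm (bfr (keyOf stats)) pool []).length_eq
    have htc0 : (0 : Int) ≤ min (max k 0) (sorted.length : Int) := by omega
    rw [PySem.List.slice_to sorted htc0, hlen]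
    rw [pick_eq stats (min (max k 0) (pool.length : Int)).toNat pool hnd (by omega)]
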